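-- pv_equiv track=rewrite | github.com/NeruoDissident/FracturedCity | room_system.py | _count_venue_furniture_categories
-- ===== SOURCE A (Python) =====
-- VENUE_FURNITURE_CATEGORIES = {
--     "bar_furniture": [
--         "bar_stool",
--         "scrap_bar_counter",
--         "finished_bar",
--         "gutter_still",
--         "finished_gutter_still",
--     ],
--     "music_equipment": [
--         "scrap_guitar_placed",
--         "drum_kit_placed",
--         "synth_placed",
--         "harmonica_placed",
--         "amp_placed",
--         "stage",
--         "finished_stage",
--     ],
--     "seating": [
--         "comfort_chair",
--         "bar_stool",
--         "crash_bed",  # Lounge seating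
--     ],
--     "tables": [
--         "dining_table",
--         "workshop_table",
--         "gutter_slab",
--     ],
--     "luxury": [
--         # Future: pool, chandelier, fountain, etc.
--     ],
-- }
--
-- def _count_venue_furniture_categories(contents: dict) -> dict:
--     """Count furniture items by category for Social Venues.
--
--     Args:
--         contents: Dict of {tile_type: count}
--
--     Returns:
--         Dict of {category: count}
--     """
--     category_counts = {}
--
--     for category, furniture_list in VENUE_FURNITURE_CATEGORIES.items():
--         count = 0
--         for furniture_item in furniture_list:
--             count += contents.get(furniture_item, 0)
--         if count > 0:
--             category_counts[category] = count
--
--     return category_counts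
-- ===== SOURCE B (Python) =====
-- # Inverted index: single pass over the actual contents instead of re-scanning the category catalogue.
-- VENUE_FURNITURE_CATEGORIES = {
--     "bar_furniture": [
--         "bar_stool",
--         "scrap_bar_counter",
--         "finished_bar",
--         "gutter_still",
--         "finished_gutter_still",
--     ],
--     "music_equipment": [
--         "scrap_guitar_placed",
--         "drum_kit_placed",
--         "synth_placed",
--         "harmonica_placed",
--         "amp_placed",
--         "stage",
--         "finished_stage",
--     ],
--     "seating": [
--         "comfort_chair",
--         "bar_stool",
--         "crash_bed",
--     ],
--     "tables": [
--         "dining_table",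
--         "workshop_table",
--         "gutter_slab",
--     ],
--     "luxury": [],
-- }
--
-- _CATEGORY_ORDER = list(VENUE_FURNITURE_CATEGORIES)
-- _ITEM_INDEX = {}
-- for _cat, _items in VENUE_FURNITURE_CATEGORIES.items():
--     for _item in _items:
--         _ITEM_INDEX[_item] = _ITEM_INDEX.get(_item, []) + [_cat]
--
--
-- def _count_venue_furniture_categories(contents: dict) -> dict:
--     totals = {}
--     for item, cnt in contents.items():
--         for cat in _ITEM_INDEX.get(item, []):
--             totals[cat] = totals.get(cat, 0) + cnt
--     return {cat: totals[cat] for cat in _CATEGORY_ORDER if totals.get(cat, 0) > 0}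
-- ===== Notes on version B (the rewrite author's own statement) =====
-- stated objective: idiomatic
-- what changed: Instead of re-scanning the whole fixed category catalogue with an inner contents.get per furniture item, B precomputes an inverted index item->categories once and makes a single pass over the actual contents, accumulating per-category totals, then emits categories with positive totals in catalogue order.
import Mathlib
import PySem

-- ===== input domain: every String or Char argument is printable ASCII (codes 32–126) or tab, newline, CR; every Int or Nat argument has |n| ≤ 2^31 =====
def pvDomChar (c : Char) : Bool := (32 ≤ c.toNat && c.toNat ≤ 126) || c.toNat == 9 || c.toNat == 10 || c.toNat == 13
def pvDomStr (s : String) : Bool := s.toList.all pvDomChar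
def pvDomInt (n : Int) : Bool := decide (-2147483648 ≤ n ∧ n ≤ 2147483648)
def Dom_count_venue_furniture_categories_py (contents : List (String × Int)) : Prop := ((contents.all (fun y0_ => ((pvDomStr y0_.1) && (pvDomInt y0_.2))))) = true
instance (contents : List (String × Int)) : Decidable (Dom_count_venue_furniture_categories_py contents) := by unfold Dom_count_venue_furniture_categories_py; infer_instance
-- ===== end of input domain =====

-- B replaces A's scan of the whole fixed category catalogue (with an inner contents.get per item)
-- by ONE pass over the actual contents, using a precomputed inverted index item → categories (idiomatic/alternative; same answer, same order).
-- Equivalence is about the RETURN value; neither version mutates its argument.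

-- ===== PORT A =====
-- VENUE_FURNITURE_CATEGORIES, as an (insertion-ordered) association list.
def pvCatList : List (String × List String) :=
  [("bar_furniture", ["bar_stool", "scrap_bar_counter", "finished_bar", "gutter_still", "finished_gutter_still"]),
   ("music_equipment", ["scrap_guitar_placed", "drum_kit_placed", "synth_placed", "harmonica_placed", "amp_placed", "stage", "finished_stage"]),
   ("seating", ["comfort_chair", "bar_stool", "crash_bed"]),
   ("tables", ["dining_table", "workshop_table", "gutter_slab"]),
   ("luxury", [])]

-- A: for each category, sum contents.get(item, 0) over its furniture list; keep positive counts.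
-- category_counts[category] = count always ADDS A FRESH KEY (the five categories are distinct), so the
-- dict assignment is exactly an append to the insertion-ordered association list.
def count_venue_furniture_categories_py (contents : List (String × Int)) : List (String × Int) :=
  pvCatList.foldl (fun acc p =>
    let count := p.2.foldl (fun c item => c + (PySem.Dict.mk contents).getD item 0) 0
    if count > 0 then acc ++ [(p.1, count)] else acc) []

-- ===== PORT B =====
-- module-level inverted index _ITEM_INDEX: item → list of categories containing it (built once, as in Source B)
def pvItemIndex : PySem.Dict String (List String) :=
  pvCatList.foldl (fun d p => p.2.foldl (fun d it => d.insert it (d.getD it [] ++ [p.1])) d) PySem.Dict.empty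

def count_venue_furniture_categories_py_alt (contents : List (String × Int)) : List (String × Int) :=
  let totals := contents.foldl (fun (t : PySem.Dict String Int) p =>
    (pvItemIndex.getD p.1 []).foldl (fun t cat => t.insert cat (t.getD cat 0 + p.2)) t) PySem.Dict.empty
  (pvCatList.map Prod.fst).filterMap (fun cat =>
    if totals.getD cat 0 > 0 then some (cat, totals.getD cat 0) else none)

-- ===== PRECONDITION & SPEC =====
-- Pre_ excludes association lists with duplicate keys: they have no Python-dict counterpart (a dict
-- literal silently collapses duplicates to the LAST value, while the association-list convention reads
-- the FIRST match), so no behaviour there is specified by A.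
def Pre_count_venue_furniture_categories_py (contents : List (String × Int)) : Prop :=
  (contents.map Prod.fst).Nodup
instance (contents : List (String × Int)) : Decidable (Pre_count_venue_furniture_categories_py contents) := by unfold Pre_count_venue_furniture_categories_py; infer_instance

def pvWitness_count_venue_furniture_categories_py : (List (String × Int)) :=
  [("bar_stool", 2), ("stage", 1), ("junk", 5)]

def Spec_count_venue_furniture_categories_py (contents : List (String × Int)) (out : List (String × Int)) : Prop := out = count_venue_furniture_categories_py_alt contents
instance (contents : List (String × Int)) (out : List (String × Int)) : Decidable (Spec_count_venue_furniture_categories_py contents out) := by unfold Spec_count_venue_furniture_categories_py; infer_instance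

-- ===== CLAIM (what is proved, stated in full; the proofs are below) =====
def Claim_equal_count_venue_furniture_categories_py : Prop := ∀ (contents : List (String × Int)), Dom_count_venue_furniture_categories_py contents → Pre_count_venue_furniture_categories_py contents → Spec_count_venue_furniture_categories_py contents (count_venue_furniture_categories_py contents)

-- ===== LEMMAS AND PROOFS =====

-- the inverted index, evaluated (it is a closed term)
def pvItemIndexLit : PySem.Dict String (List String) := PySem.Dict.mk
  [("bar_stool", ["bar_furniture", "seating"]), ("scrap_bar_counter", ["bar_furniture"]),
   ("finished_bar", ["bar_furniture"]), ("gutter_still", ["bar_furniture"]),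
   ("finished_gutter_still", ["bar_furniture"]), ("scrap_guitar_placed", ["music_equipment"]),
   ("drum_kit_placed", ["music_equipment"]), ("synth_placed", ["music_equipment"]),
   ("harmonica_placed", ["music_equipment"]), ("amp_placed", ["music_equipment"]),
   ("stage", ["music_equipment"]), ("finished_stage", ["music_equipment"]),
   ("comfort_chair", ["seating"]), ("crash_bed", ["seating"]), ("dining_table", ["tables"]),
   ("workshop_table", ["tables"]), ("gutter_slab", ["tables"])]

lemma pvItemIndex_eval : pvItemIndex = pvItemIndexLit := by decide

def pvKeys : List String :=
  ["bar_stool", "scrap_bar_counter", "finished_bar", "gutter_still", "finished_gutter_still",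
   "scrap_guitar_placed", "drum_kit_placed", "synth_placed", "harmonica_placed", "amp_placed",
   "stage", "finished_stage", "comfort_chair", "crash_bed", "dining_table", "workshop_table",
   "gutter_slab"]

def pvS (L : List String) (contents : List (String × Int)) : Int :=
  (contents.map (fun p => if p.1 ∈ L then p.2 else 0)).sum

-- one contents entry (item, v) adds v to category c's running total iff item belongs to c's list
lemma pv_step (c : String) (L : List String) (h : (c, L) ∈ pvCatList)
    (t : PySem.Dict String Int) (item : String) (v : Int) :
    ((pvItemIndex.getD item []).foldl (fun t cat => t.insert cat (t.getD cat 0 + v)) t).getD c 0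
      = t.getD c 0 + (if item ∈ L then v else 0) := by
  rw [pvItemIndex_eval]
  by_cases hm : item ∈ pvKeys
  · fin_cases h <;> fin_cases hm <;>
      simp [pvItemIndexLit, PySem.Dict.getD_eq_get?_getD, PySem.Dict.get?_mk_cons,
        PySem.Dict.get?_insert]
  · simp only [pvKeys, List.mem_cons, List.not_mem_nil, or_false, not_or] at hm
    obtain ⟨h1, h2, h3, h4, h5, h6, h7, h8, h9, h10, h11, h12, h13, h14, h15, h16, h17⟩ := hm
    have hidx : pvItemIndexLit.getD item [] = [] := by
      simp [pvItemIndexLit, PySem.Dict.getD_eq_get?_getD, PySem.Dict.get?_mk_cons,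
        Ne.symm h1, Ne.symm h2, Ne.symm h3, Ne.symm h4, Ne.symm h5, Ne.symm h6, Ne.symm h7,
        Ne.symm h8, Ne.symm h9, Ne.symm h10, Ne.symm h11, Ne.symm h12, Ne.symm h13, Ne.symm h14,
        Ne.symm h15, Ne.symm h16, Ne.symm h17]
      rfl
    rw [hidx]
    have hnotL : item ∉ L := by
      fin_cases h <;> simp_all
    simp [List.foldl, hnotL]

lemma pv_totals (c : String) (L : List String) (h : (c, L) ∈ pvCatList)
    (contents : List (String × Int)) :
    ∀ t : PySem.Dict String Int,
      ((contents.foldl (fun (t : PySem.Dict String Int) p =>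
          (pvItemIndex.getD p.1 []).foldl (fun t cat => t.insert cat (t.getD cat 0 + p.2)) t) t).getD c 0)
        = t.getD c 0 + pvS L contents := by
  induction contents with
  | nil => intro t; simp [pvS]
  | cons p rest ih =>
      intro t
      rw [List.foldl_cons, ih, pv_step c L h]
      simp [pvS]
      ring

lemma pv_sum_ite (p1 : String) (v : Int) (g : String → Int) (hg : g p1 = 0) :
    ∀ L : List String, L.Nodup →
      (L.map (fun i => if p1 = i then v else g i)).sum
        = (L.map g).sum + (if p1 ∈ L then v else 0) := by
  intro L
  induction L with
  | nil => simp
  | cons a L ih =>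
      intro hnd
      rcases List.nodup_cons.mp hnd with ⟨ha, hL⟩
      by_cases hpa : p1 = a
      · subst hpa
        have : L.map (fun i => if p1 = i then v else g i) = L.map g := by
          apply List.map_congr_left
          intro i hi
          have : p1 ≠ i := fun e => ha (e ▸ hi)
          simp [this]
        simp [this, hg]
        ring
      · simp only [List.map_cons, List.sum_cons, ih hL, List.mem_cons]
        have : ¬ p1 = a := hpa
        simp [this]
        ring

lemma pv_dict_sum (L : List String) (hL : L.Nodup) :
    ∀ contents : List (String × Int), (contents.map Prod.fst).Nodup →
      (L.map (fun i => (PySem.Dict.mk contents).getD i 0)).sum = pvS L contents := by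
  intro contents
  induction contents with
  | nil =>
      intro _
      have h0 : ∀ i : String, (PySem.Dict.mk ([] : List (String × Int))).getD i 0 = 0 := fun i => rfl
      simp [pvS, h0]
  | cons p rest ih =>
      intro hnd
      obtain ⟨k, v⟩ := p
      rw [List.map_cons, List.nodup_cons] at hnd
      obtain ⟨hp, hrest⟩ := hnd
      have hcons : ∀ i : String,
          (PySem.Dict.mk ((k, v) :: rest)).getD i 0
            = if k = i then v else (PySem.Dict.mk rest).getD i 0 := by
        intro i
        by_cases h : k = i <;>
          simp [PySem.Dict.getD_eq_get?_getD, PySem.Dict.get?_mk_cons, h]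
      have hg0 : (PySem.Dict.mk rest).getD k 0 = 0 := by
        apply PySem.Dict.getD_of_not_contains
        simp only [PySem.Dict.contains_mk]
        simp
        intro a b hab e
        subst e
        exact hp (List.mem_map.mpr ⟨(a, b), hab, rfl⟩)
      calc (L.map (fun i => (PySem.Dict.mk ((k, v) :: rest)).getD i 0)).sum
          = (L.map (fun i => if k = i then v else (PySem.Dict.mk rest).getD i 0)).sum := by
            simp only [hcons]
        _ = (L.map (fun i => (PySem.Dict.mk rest).getD i 0)).sum + (if k ∈ L then v else 0) :=
            pv_sum_ite k v _ hg0 L hL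
        _ = pvS L rest + (if k ∈ L then v else 0) := by rw [ih hrest]
        _ = pvS L ((k, v) :: rest) := by simp [pvS]; ring

-- generic shape: A's append-if fold over the catalogue vs B's filterMap over the category names
lemma pv_shape (cl : List (String × List String)) (f : String × List String → Int) (g : String → Int)
    (h : ∀ p ∈ cl, f p = g p.1) :
    ∀ acc : List (String × Int),
      cl.foldl (fun acc p => if f p > 0 then acc ++ [(p.1, f p)] else acc) acc
        = acc ++ (cl.map Prod.fst).filterMap (fun c => if g c > 0 then some (c, g c) else none) := by
  induction cl with
  | nil => intro acc; simp
  | cons q cl ih =>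
      intro acc
      have hq : f q = g q.1 := h q (by simp)
      have ht : ∀ p ∈ cl, f p = g p.1 := fun p hp => h p (by simp [hp])
      simp only [List.foldl_cons, List.map_cons, List.filterMap_cons, hq]
      by_cases hpos : g q.1 > 0
      · simp [hpos, ih ht]
      · simp [hpos, ih ht]


-- ===== VERDICT (by name: the statement is the Claim_ definition above) =====
theorem count_venue_furniture_categories_py_spec : Claim_equal_count_venue_furniture_categories_py := by
  intro contents _ hpre
  unfold Spec_count_venue_furniture_categories_py
  unfold count_venue_furniture_categories_py count_venue_furniture_categories_py_alt
  have key : ∀ p ∈ pvCatList,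
      (p.2.foldl (fun c item => c + (PySem.Dict.mk contents).getD item 0) 0)
        = ((contents.foldl (fun (t : PySem.Dict String Int) q =>
            (pvItemIndex.getD q.1 []).foldl (fun t cat => t.insert cat (t.getD cat 0 + q.2)) t)
            PySem.Dict.empty).getD p.1 0) := by
    intro p hp
    rw [PySem.List.foldl_add, pv_totals p.1 p.2 hp contents PySem.Dict.empty]
    have hL : p.2.Nodup := by fin_cases hp <;> decide
    rw [pv_dict_sum p.2 hL contents hpre]
    simp [PySem.Dict.getD_empty]
  rw [pv_shape pvCatList _
      (fun c => ((contents.foldl (fun (t : PySem.Dict String Int) q =>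
        (pvItemIndex.getD q.1 []).foldl (fun t cat => t.insert cat (t.getD cat 0 + q.2)) t)
        PySem.Dict.empty).getD c 0)) key []]
  simp
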